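-- pv_equiv track=rewrite | github.com/edjohn/cs61a | Projects/cats/cats.py | shifty_shifts
-- ===== SOURCE A (Python) =====
-- def shifty_shifts(start, goal, limit):
--     """A diff function for autocorrect that determines how many letters
--     in START need to be substituted to create GOAL, then adds the difference in
--     their lengths.
--     """
--     if limit < 0:
--         return 0
--     elif len(start) == 0:
--         return 0
--     elif len(goal) > len(start):
--         diff = len(goal) - len(start)
--         return diff + shifty_shifts(start, goal[:-diff], limit - diff)
--     elif len(start) > len(goal):
--         diff = len(start) - len(goal)
--         return diff + shifty_shifts(start[:-diff], goal, limit - diff)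
--     elif start[0] == goal[0]:
--         return shifty_shifts(start[1:], goal[1:], limit)
--     else:
--         return 1 + shifty_shifts(start[1:], goal[1:], limit - 1)
-- ===== SOURCE B (Python) =====
-- def shifty_shifts(start, goal, limit):
--     if limit < 0 or len(start) == 0:
--         return 0
--     d = abs(len(start) - len(goal))
--     remaining = limit - d
--     if remaining < 0:
--         return d
--     diffs = sum(1 for a, b in zip(start, goal) if a != b)
--     return d + min(diffs, remaining + 1)
-- ===== Notes on version B (the rewrite author's own statement) =====
-- stated objective: faster
-- what changed: Replaces A's recursive budget-tracking early-terminating scan with a non-recursive closed form: count all mismatches over zip(start, goal) in one pass and clamp arithmetically with the length difference and remaining budget.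
import Mathlib
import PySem

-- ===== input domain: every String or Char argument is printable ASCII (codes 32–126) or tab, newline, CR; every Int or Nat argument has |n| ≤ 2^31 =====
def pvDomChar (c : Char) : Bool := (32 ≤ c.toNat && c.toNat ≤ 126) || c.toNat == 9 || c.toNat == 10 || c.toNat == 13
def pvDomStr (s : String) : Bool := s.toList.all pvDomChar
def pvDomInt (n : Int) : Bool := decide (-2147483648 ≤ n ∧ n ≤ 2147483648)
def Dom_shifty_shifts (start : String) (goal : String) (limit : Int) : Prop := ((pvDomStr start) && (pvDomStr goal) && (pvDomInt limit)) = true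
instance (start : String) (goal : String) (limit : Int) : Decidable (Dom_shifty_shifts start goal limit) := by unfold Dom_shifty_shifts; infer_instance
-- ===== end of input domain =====

-- B replaces A's recursive budget-tracking scan with one non-recursive counting pass plus arithmetic clamping (objective: faster; measured).

-- A-side helper: xs[:-k] for the positive length difference k = xs.length - n (exact slice semantics)
theorem pvSliceNeg {α : Type} (g : List α) (n : Nat) (h : n < g.length) :
    PySem.List.slice g none (some ((n : Int) - (g.length : Int))) = g.take n := by
  have hk : (n : Int) - (g.length : Int) = -((g.length - n : Nat) : Int) := by
    push_cast [Nat.cast_sub (le_of_lt h)]; ring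
  rw [hk, PySem.List.slice_to_neg_natCast g (g.length - n) (by omega)]
  congr 1; omega

-- ===== PORT A =====
-- literal transliteration of A's recursion on the character lists of the strings
def shiftyCore : List Char → List Char → Int → Int
  | s, g, l =>
    if l < 0 then 0
    else if s.length = 0 then 0
    else if g.length > s.length then
      let d : Int := (g.length : Int) - (s.length : Int)
      d + shiftyCore s (PySem.List.slice g none (some (-d))) (l - d)
    else if s.length > g.length then
      let d : Int := (s.length : Int) - (g.length : Int)
      d + shiftyCore (PySem.List.slice s none (some (-d))) g (l - d)
    else if PySem.List.pyGet? s 0 = PySem.List.pyGet? g 0 then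
      shiftyCore (PySem.List.slice s (some 1) none) (PySem.List.slice g (some 1) none) l
    else
      1 + shiftyCore (PySem.List.slice s (some 1) none) (PySem.List.slice g (some 1) none) (l - 1)
  termination_by s g _ => s.length + g.length
  decreasing_by
  · have := pvSliceNeg g s.length (by omega)
    simp only [neg_sub] at *
    rw [this]
    simp; omega
  · have := pvSliceNeg s g.length (by omega)
    simp only [neg_sub] at *
    rw [this]
    simp; omega
  · simp [PySem.List.slice_from_one]
    cases s <;> cases g <;> simp_all <;> omega
  · simp [PySem.List.slice_from_one]
    cases s <;> cases g <;> simp_all <;> omega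

def shifty_shifts (start : String) (goal : String) (limit : Int) : Int :=
  shiftyCore start.toList goal.toList limit

-- ===== PORT B =====
def shifty_shifts_alt (start : String) (goal : String) (limit : Int) : Int :=
  let s := start.toList
  let g := goal.toList
  if limit < 0 ∨ s.length = 0 then 0
  else
    let d : Int := |(s.length : Int) - (g.length : Int)|
    let remaining := limit - d
    if remaining < 0 then d
    else
      let diffs : Int := (s.zip g).foldl (fun acc p => if p.1 ≠ p.2 then acc + 1 else acc) 0
      d + min diffs (remaining + 1)

-- ===== PRECONDITION & SPEC =====
def Spec_shifty_shifts (start : String) (goal : String) (limit : Int) (out : Int) : Prop := out = shifty_shifts_alt start goal limit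
instance (start : String) (goal : String) (limit : Int) (out : Int) : Decidable (Spec_shifty_shifts start goal limit out) := by unfold Spec_shifty_shifts; infer_instance

-- ===== CLAIM (what is proved, stated in full; the proofs are below) =====
def Claim_equal_shifty_shifts : Prop := ∀ (start : String) (goal : String) (limit : Int), Dom_shifty_shifts start goal limit → Spec_shifty_shifts start goal limit (shifty_shifts start goal limit)

-- ===== LEMMAS AND PROOFS =====
theorem shiftyCore_neg (s g : List Char) (l : Int) (h : l < 0) : shiftyCore s g l = 0 := by
  rw [shiftyCore]; simp [h]

-- characterisation of A's scan on equal-length lists with nonnegative budget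
theorem shiftyCore_eq_min (s : List Char) : ∀ (g : List Char) (l : Int),
    s.length = g.length → 0 ≤ l →
    shiftyCore s g l = min ((s.zip g).countP (fun p => p.1 ≠ p.2) : Int) (l + 1) := by
  induction s with
  | nil =>
    intro g l _ hl
    rw [shiftyCore]; simp; omega
  | cons a s' ih =>
    intro g l hlen hl
    cases g with
    | nil => simp at hlen
    | cons b g' =>
      simp only [List.length_cons, Nat.add_right_cancel_iff] at hlen
      rw [shiftyCore]
      rw [if_neg (by omega : ¬ l < 0)]
      rw [if_neg (by simp : ¬ (a :: s').length = 0)]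
      rw [if_neg (by simp [hlen] : ¬ (b :: g').length > (a :: s').length)]
      rw [if_neg (by simp [hlen] : ¬ (a :: s').length > (b :: g').length)]
      rw [PySem.List.slice_from_one, PySem.List.slice_from_one]
      simp only [List.tail_cons]
      have hnn : 0 ≤ ((s'.zip g').countP (fun p => p.1 ≠ p.2) : Int) := by positivity
      by_cases hab : a = b
      · rw [if_pos (by simp [PySem.List.pyGet?, PySem.List.pyIdx?, hab])]
        have hcn : ((a :: s').zip (b :: g')).countP (fun p => p.1 ≠ p.2)
            = (s'.zip g').countP (fun p => p.1 ≠ p.2) := by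
          simp [List.zip_cons_cons, hab]
        rw [hcn, ih g' l hlen hl]
      · rw [if_neg (by simp [PySem.List.pyGet?, PySem.List.pyIdx?, hab])]
        have hcn : ((a :: s').zip (b :: g')).countP (fun p => p.1 ≠ p.2)
            = (s'.zip g').countP (fun p => p.1 ≠ p.2) + 1 := by
          simp [List.zip_cons_cons, hab]
        rw [hcn]
        by_cases hl1 : 0 ≤ l - 1
        · rw [ih g' (l - 1) hlen hl1]
          push_cast
          omega
        · rw [shiftyCore_neg _ _ _ (by omega)]
          push_cast
          omega

theorem zip_take_right (xs ys : List Char) : xs.zip (ys.take xs.length) = xs.zip ys := by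
  induction xs generalizing ys with
  | nil => simp
  | cons a xs ih => cases ys <;> simp [ih]

theorem zip_take_left (xs ys : List Char) : (xs.take ys.length).zip ys = xs.zip ys := by
  induction xs generalizing ys with
  | nil => simp
  | cons a xs ih => cases ys <;> simp [ih]

-- ===== VERDICT (by name: the statement is the Claim_ definition above) =====
theorem shifty_shifts_spec : Claim_equal_shifty_shifts := by
  intro start goal limit _
  show shiftyCore start.toList goal.toList limit = shifty_shifts_alt start goal limit
  simp only [shifty_shifts_alt]
  set s := start.toList with hs
  set g := goal.toList with hg
  have hfold : (List.foldl (fun acc (p : Char × Char) => if p.1 ≠ p.2 then acc + 1 else acc) 0 (s.zip g))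
      = ((s.zip g).countP (fun p => p.1 ≠ p.2) : Int) := by
    simpa using PySem.List.foldl_count_if (fun p : Char × Char => decide (p.1 ≠ p.2)) (s.zip g) 0
  rw [hfold]
  by_cases h0 : limit < 0 ∨ s.length = 0
  · rw [if_pos h0, shiftyCore]
    rcases h0 with h | h
    · simp [h]
    · simp [h]
  · push Not at h0
    obtain ⟨hl, hne⟩ := h0
    rw [if_neg (by push Not; exact ⟨hl, hne⟩)]
    rcases lt_trichotomy s.length g.length with hlt | heq | hgt
    · -- goal longer: A truncates goal once
      have hd : |(s.length : Int) - (g.length : Int)| = (g.length : Int) - s.length := by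
        rw [abs_sub_comm]; rw [abs_of_nonneg (by omega : (0:Int) ≤ (g.length : Int) - s.length)]
      rw [shiftyCore]
      simp only [if_neg (by omega : ¬ limit < 0), if_neg (by omega : ¬ s.length = 0),
        if_pos hlt]
      have hsl : PySem.List.slice g none (some (-((g.length : Int) - (s.length : Int)))) = g.take s.length := by
        have := pvSliceNeg g s.length hlt
        rw [← this]; congr 1; ring_nf
      rw [hsl, hd]
      set d : Int := (g.length : Int) - s.length with hdd
      by_cases hr : limit - d < 0
      · rw [if_pos hr, shiftyCore_neg _ _ _ (by omega)]; ring
      · rw [if_neg hr]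
        rw [shiftyCore_eq_min s (g.take s.length) (limit - d)
          (by simp; omega) (by omega)]
        rw [zip_take_right]
    · -- equal lengths
      have hd : |(s.length : Int) - (g.length : Int)| = 0 := by rw [heq]; simp
      rw [hd, if_neg (by omega : ¬ limit - 0 < 0)]
      rw [shiftyCore_eq_min s g limit heq hl]
      omega
    · -- start longer: A truncates start once
      have hd : |(s.length : Int) - (g.length : Int)| = (s.length : Int) - g.length := by
        rw [abs_of_nonneg (by omega : (0:Int) ≤ (s.length : Int) - g.length)]
      rw [shiftyCore]
      simp only [if_neg (by omega : ¬ limit < 0), if_neg (by omega : ¬ s.length = 0),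
        if_neg (by omega : ¬ g.length > s.length), if_pos hgt]
      have hsl : PySem.List.slice s none (some (-((s.length : Int) - (g.length : Int)))) = s.take g.length := by
        have := pvSliceNeg s g.length hgt
        rw [← this]; congr 1; ring_nf
      rw [hsl, hd]
      set d : Int := (s.length : Int) - g.length with hdd
      by_cases hr : limit - d < 0
      · rw [if_pos hr, shiftyCore_neg _ _ _ (by omega)]; ring
      · rw [if_neg hr]
        rw [shiftyCore_eq_min (s.take g.length) g (limit - d)
          (by simp; omega) (by omega)]
        rw [zip_take_left]
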